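-- pv_equiv track=rewrite | github.com/dagoaty/adventofcode2025 | day12/solution.py | generate_orientations
-- ===== SOURCE A (Python) =====
-- from typing import Set, List, Tuple
--
-- def rotate_90(coords: Set[Tuple[int, int]]) -> Set[Tuple[int, int]]:
--     """Rotate coordinates 90 degrees clockwise."""
--     if not coords:
--         return set()
--
--     # Rotate: (r, c) -> (c, -r)
--     rotated = {(c, -r) for r, c in coords}
--
--     # Normalize to start from (0, 0)
--     min_r = min(r for r, c in rotated)
--     min_c = min(c for r, c in rotated)
--     return {(r - min_r, c - min_c) for r, c in rotated}
--
-- def flip_horizontal(coords: Set[Tuple[int, int]]) -> Set[Tuple[int, int]]: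
--     """Flip coordinates horizontally."""
--     if not coords:
--         return set()
--
--     # Flip: (r, c) -> (r, -c)
--     flipped = {(r, -c) for r, c in coords}
--
--     # Normalize to start from (0, 0)
--     min_r = min(r for r, c in flipped)
--     min_c = min(c for r, c in flipped)
--     return {(r - min_r, c - min_c) for r, c in flipped}
--
-- def generate_orientations(coords: Set[Tuple[int, int]]) -> List[Set[Tuple[int, int]]]:
--     """
--     Generate all unique orientations (rotations + flips) of a tile.
--
--     Returns list of unique coordinate sets.
--     """
--     orientations = []
--     seen = set()
--
--     # Generate original and flipped, each with 4 rotations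
--     for base in [coords, flip_horizontal(coords)]:
--         current = base
--         for _ in range(4):
--             # Convert to frozenset for hashing
--             frozen = frozenset(current)
--             if frozen not in seen:
--                 seen.add(frozen)
--                 orientations.append(current)
--             current = rotate_90(current)
--
--     return orientations
-- ===== SOURCE B (Python) =====
-- def generate_orientations(coords):
--     """
--     Generate all unique orientations (rotations + flips) of a tile.
--
--     Returns list of unique coordinate sets.
--     """
--     if not coords:
--         return [set()]
--
--     # The seven non-identity dihedral transforms, in the order A produces them:
--     # rot90, rot180, rot270, flip, flip+rot90, flip+rot180, flip+rot270.
--     transforms = [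
--         lambda r, c: (c, -r),
--         lambda r, c: (-r, -c),
--         lambda r, c: (-c, r),
--         lambda r, c: (r, -c),
--         lambda r, c: (-c, -r),
--         lambda r, c: (-r, c),
--         lambda r, c: (c, r),
--     ]
--
--     orientations = [coords]
--     seen = [frozenset(coords)]
--     for t in transforms:
--         mapped = {t(r, c) for r, c in coords}
--         min_r = min(r for r, _ in mapped)
--         min_c = min(c for _, c in mapped)
--         cand = {(r - min_r, c - min_c) for r, c in mapped}
--         frozen = frozenset(cand)
--         if frozen not in seen:
--             seen.append(frozen)
--             orientations.append(cand)
--     return orientations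
-- ===== Notes on version B (the rewrite author's own statement) =====
-- stated objective: simpler
-- what changed: A chains two bases (original and flipped) through four repeated rotate_90 calls, re-normalizing at every step; B makes one flat pass over a precomputed table of the seven non-identity dihedral coordinate maps, applies each directly to the original coords, normalizes once, and dedups against a seen list.
import Mathlib
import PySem

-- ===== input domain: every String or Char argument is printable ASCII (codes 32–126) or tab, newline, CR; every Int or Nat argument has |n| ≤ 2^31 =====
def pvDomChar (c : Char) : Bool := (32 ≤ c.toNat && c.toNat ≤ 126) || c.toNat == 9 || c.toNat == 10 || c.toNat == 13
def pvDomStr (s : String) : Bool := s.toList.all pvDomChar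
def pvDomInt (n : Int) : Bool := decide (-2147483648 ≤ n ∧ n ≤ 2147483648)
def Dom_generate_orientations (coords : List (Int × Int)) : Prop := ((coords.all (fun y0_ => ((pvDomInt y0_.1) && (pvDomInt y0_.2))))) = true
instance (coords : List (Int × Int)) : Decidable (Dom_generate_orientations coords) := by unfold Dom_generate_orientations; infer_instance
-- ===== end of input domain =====

-- B replaces A's "two bases × four chained rotate_90 calls" with one flat pass over a
-- precomputed table of the seven non-identity dihedral coordinate maps, each applied
-- directly to the original coords and normalized once (objective: simpler decomposition).

-- ===== PORT A =====
def pvRot90 (coords : List (Int × Int)) : List (Int × Int) :=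
  if coords = [] then []
  else
    let rotated : PySem.Set (Int × Int) := PySem.Set.ofList (coords.map (fun p => (p.2, -p.1)))
    let min_r : Int := (PySem.List.min? (rotated.map (fun p => p.1)) (fun x => x)).getD 0
    let min_c : Int := (PySem.List.min? (rotated.map (fun p => p.2)) (fun x => x)).getD 0
    PySem.Set.ofList (rotated.map (fun p => (p.1 - min_r, p.2 - min_c)))

def pvFlipH (coords : List (Int × Int)) : List (Int × Int) :=
  if coords = [] then []
  else
    let flipped : PySem.Set (Int × Int) := PySem.Set.ofList (coords.map (fun p => (p.1, -p.2)))
    let min_r : Int := (PySem.List.min? (flipped.map (fun p => p.1)) (fun x => x)).getD 0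
    let min_c : Int := (PySem.List.min? (flipped.map (fun p => p.2)) (fun x => x)).getD 0
    PySem.Set.ofList (flipped.map (fun p => (p.1 - min_r, p.2 - min_c)))

-- the 'for _ in range(4)' loop: state = (orientations, seen), current rotated each turn
def pvInner : Nat → (List (List (Int × Int)) × List (List (Int × Int))) → List (Int × Int) → List (List (Int × Int)) × List (List (Int × Int))
  | 0, st, _ => st
  | n+1, st, current =>
      let st' := if st.2.any (fun s => PySem.Set.equal s current) then st
                 else (st.1 ++ [current], st.2 ++ [current])
      pvInner n st' (pvRot90 current)

def generate_orientations (coords : List (Int × Int)) : List (List (Int × Int)) :=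
  ([coords, pvFlipH coords].foldl (fun st base => pvInner 4 st base) ([], [])).1

-- ===== PORT B =====
-- loop body of B: apply transform t to every cell, normalize to start from (0, 0)
def pvCandB (coords : List (Int × Int)) (t : (Int × Int) → (Int × Int)) : List (Int × Int) :=
  let mapped : PySem.Set (Int × Int) := PySem.Set.ofList (coords.map (fun p => t p))
  let min_r : Int := (PySem.List.min? (mapped.map (fun p => p.1)) (fun x => x)).getD 0
  let min_c : Int := (PySem.List.min? (mapped.map (fun p => p.2)) (fun x => x)).getD 0
  PySem.Set.ofList (mapped.map (fun p => (p.1 - min_r, p.2 - min_c)))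

def generate_orientations_alt (coords : List (Int × Int)) : List (List (Int × Int)) :=
  if coords = [] then [[]]
  else
    let transforms : List ((Int × Int) → (Int × Int)) :=
      [fun p => (p.2, -p.1), fun p => (-p.1, -p.2), fun p => (-p.2, p.1),
       fun p => (p.1, -p.2), fun p => (-p.2, -p.1), fun p => (-p.1, p.2), fun p => (p.2, p.1)]
    (transforms.foldl (fun st t =>
        let cand := pvCandB coords t
        if st.2.any (fun s => PySem.Set.equal s cand) then st
        else (st.1 ++ [cand], st.2 ++ [cand]))
      ([coords], [coords])).1

-- ===== PRECONDITION & SPEC =====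
def Spec_generate_orientations (coords : List (Int × Int)) (out : List (List (Int × Int))) : Prop := out = generate_orientations_alt coords
instance (coords : List (Int × Int)) (out : List (List (Int × Int))) : Decidable (Spec_generate_orientations coords out) := by unfold Spec_generate_orientations; infer_instance

-- ===== CLAIM (what is proved, stated in full; the proofs are below) =====
def Claim_equal_generate_orientations : Prop := ∀ (coords : List (Int × Int)), Dom_generate_orientations coords → Spec_generate_orientations coords (generate_orientations coords)

-- ===== LEMMAS AND PROOFS =====

-- per-axis minimum of a coordinate list (getD-totalised; used only on nonempty lists)
def pvMinF (m : List (Int × Int)) : Int := (PySem.List.min? (m.map (fun p => p.1)) (fun x => x)).getD 0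
def pvMinS (m : List (Int × Int)) : Int := (PySem.List.min? (m.map (fun p => p.2)) (fun x => x)).getD 0

-- normalization of a duplicate-free coordinate list
def pvNorm (m : List (Int × Int)) : List (Int × Int) :=
  m.map (fun p => (p.1 - pvMinF m, p.2 - pvMinS m))

-- the dedup-and-append step both loops perform on each candidate
def pvStep (st : List (List (Int × Int)) × List (List (Int × Int))) (c : List (Int × Int)) :
    List (List (Int × Int)) × List (List (Int × Int)) :=
  if st.2.any (fun s => PySem.Set.equal s c) then st else (st.1 ++ [c], st.2 ++ [c])

theorem pvOfList_map_inj {α β : Type} [BEq α] [LawfulBEq α] [BEq β] [LawfulBEq β]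
    {f : α → β} (hf : Function.Injective f) (l : List α) :
    PySem.Set.ofList (l.map f) = (PySem.Set.ofList l).map f := by
  induction l with
  | nil => rfl
  | cons x xs ih =>
      simp only [List.map_cons, PySem.Set.ofList_cons, ih, PySem.Set.discard]
      simp only [List.filter_map, List.cons.injEq, true_and]
      congr 1
      apply List.filter_congr
      intro a _
      simp [hf.eq_iff]

theorem pvFoldlMinAdd (t : List Int) (x a : Int) :
    (t.map (fun y => y + a)).foldl min (x + a) = t.foldl min x + a := by
  induction t generalizing x with
  | nil => rfl
  | cons y ys ih => simp only [List.map_cons, List.foldl_cons, min_add_add_right, ih]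

theorem pvMinF_shift (m : List (Int × Int)) (hm : m ≠ []) (a b : Int) :
    pvMinF (m.map (fun p => (p.1 + a, p.2 + b))) = pvMinF m + a := by
  obtain ⟨q, t, rfl⟩ := List.exists_cons_of_ne_nil hm
  simp only [pvMinF, List.map_cons, List.map_map, PySem.List.min?_id_cons, Option.getD_some]
  have : (t.map ((fun p => p.1) ∘ fun p : Int × Int => (p.1 + a, p.2 + b))) =
      (t.map (fun p => p.1)).map (fun y => y + a) := by
    simp [List.map_map]
  rw [this, pvFoldlMinAdd]

theorem pvMinS_shift (m : List (Int × Int)) (hm : m ≠ []) (a b : Int) :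
    pvMinS (m.map (fun p => (p.1 + a, p.2 + b))) = pvMinS m + b := by
  obtain ⟨q, t, rfl⟩ := List.exists_cons_of_ne_nil hm
  simp only [pvMinS, List.map_cons, List.map_map, PySem.List.min?_id_cons, Option.getD_some]
  have : (t.map ((fun p => p.2) ∘ fun p : Int × Int => (p.1 + a, p.2 + b))) =
      (t.map (fun p => p.2)).map (fun y => y + b) := by
    simp [List.map_map]
  rw [this, pvFoldlMinAdd]

theorem pvNorm_shift (m : List (Int × Int)) (hm : m ≠ []) (a b : Int) :
    pvNorm (m.map (fun p => (p.1 + a, p.2 + b))) = pvNorm m := by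
  unfold pvNorm
  rw [pvMinF_shift m hm a b, pvMinS_shift m hm a b, List.map_map]
  apply List.map_congr_left
  intro p _
  simp only [Function.comp, Prod.mk.injEq]
  omega

theorem pvTransInj (a b : Int) : Function.Injective (fun p : Int × Int => (p.1 + a, p.2 + b)) := by
  intro ⟨x, y⟩ ⟨z, w⟩ h
  simp only [Prod.mk.injEq] at h
  exact Prod.ext (by omega) (by omega)

theorem pvRotInj : Function.Injective (fun p : Int × Int => (p.2, -p.1)) := by
  intro ⟨x, y⟩ ⟨z, w⟩ h
  simp only [Prod.mk.injEq] at h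
  exact Prod.ext (by omega) (by omega)

theorem pvFlipInj : Function.Injective (fun p : Int × Int => (p.1, -p.2)) := by
  intro ⟨x, y⟩ ⟨z, w⟩ h
  simp only [Prod.mk.injEq] at h
  exact Prod.ext (by omega) (by omega)

theorem pvNorm_eq_map_shift (m : List (Int × Int)) :
    pvNorm m = m.map (fun p => (p.1 + -pvMinF m, p.2 + -pvMinS m)) := by
  unfold pvNorm
  apply List.map_congr_left
  intro p _
  simp only [Prod.mk.injEq]
  omega

theorem pvNorm_nodup (m : List (Int × Int)) (h : m.Nodup) : (pvNorm m).Nodup := by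
  rw [pvNorm_eq_map_shift]
  exact h.map (pvTransInj _ _)

theorem pvNorm_ne_nil (m : List (Int × Int)) (h : m ≠ []) : pvNorm m ≠ [] := by
  unfold pvNorm
  simpa using h

theorem pvOfList_ne_nil {α : Type} [BEq α] [LawfulBEq α] (l : List α) (h : l ≠ []) :
    PySem.Set.ofList l ≠ [] := by
  obtain ⟨x, xs, rfl⟩ := List.exists_cons_of_ne_nil h
  simp [PySem.Set.ofList_cons]

-- rotate_90 / flip_horizontal on a nonempty list, written through pvNorm
theorem pvRot90_eq (l : List (Int × Int)) (h : l ≠ []) :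
    pvRot90 l = pvNorm ((PySem.Set.ofList l).map (fun p => (p.2, -p.1))) := by
  have hnd : ((PySem.Set.ofList l).map (fun p : Int × Int => (p.2, -p.1))).Nodup :=
    (PySem.Set.nodup_ofList l).map pvRotInj
  simp only [pvRot90, if_neg h, pvOfList_map_inj pvRotInj, pvNorm, pvMinF, pvMinS]
  rw [PySem.Set.ofList_eq_self_of_nodup _ (hnd.map (by
    intro p q hpq
    simp only [Prod.mk.injEq] at hpq
    exact Prod.ext (by omega) (by omega)))]

theorem pvFlipH_eq (l : List (Int × Int)) (h : l ≠ []) :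
    pvFlipH l = pvNorm ((PySem.Set.ofList l).map (fun p => (p.1, -p.2))) := by
  have hnd : ((PySem.Set.ofList l).map (fun p : Int × Int => (p.1, -p.2))).Nodup :=
    (PySem.Set.nodup_ofList l).map pvFlipInj
  simp only [pvFlipH, if_neg h, pvOfList_map_inj pvFlipInj, pvNorm, pvMinF, pvMinS]
  rw [PySem.Set.ofList_eq_self_of_nodup _ (hnd.map (by
    intro p q hpq
    simp only [Prod.mk.injEq] at hpq
    exact Prod.ext (by omega) (by omega)))]

theorem pvRot90_norm (m : List (Int × Int)) (hm : m ≠ []) (hnd : m.Nodup) :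
    pvRot90 (pvNorm m) = pvNorm (m.map (fun p => (p.2, -p.1))) := by
  rw [pvRot90_eq _ (pvNorm_ne_nil m hm),
      PySem.Set.ofList_eq_self_of_nodup _ (pvNorm_nodup m hnd)]
  have h1 : (pvNorm m).map (fun p : Int × Int => (p.2, -p.1)) =
      (m.map (fun p : Int × Int => (p.2, -p.1))).map
        (fun p => (p.1 + -pvMinS m, p.2 + pvMinF m)) := by
    rw [pvNorm_eq_map_shift, List.map_map, List.map_map]
    apply List.map_congr_left
    intro p _
    obtain ⟨a, b⟩ := p
    simp; omega
  rw [h1, pvNorm_shift _ (by simpa using hm)]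

theorem pvCandB_eq (l : List (Int × Int)) (t : (Int × Int) → (Int × Int))
    (ht : Function.Injective t) :
    pvCandB l t = pvNorm ((PySem.Set.ofList l).map t) := by
  have hnd : ((PySem.Set.ofList l).map t).Nodup := (PySem.Set.nodup_ofList l).map ht
  simp only [pvCandB, pvOfList_map_inj ht, pvNorm, pvMinF, pvMinS]
  rw [PySem.Set.ofList_eq_self_of_nodup _ (hnd.map (by
    intro p q hpq
    simp only [Prod.mk.injEq] at hpq
    exact Prod.ext (by omega) (by omega)))]

theorem pvInner_four (st : List (List (Int × Int)) × List (List (Int × Int))) (cur : List (Int × Int)) :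
    pvInner 4 st cur =
      pvStep (pvStep (pvStep (pvStep st cur) (pvRot90 cur)) (pvRot90 (pvRot90 cur)))
        (pvRot90 (pvRot90 (pvRot90 cur))) := rfl

theorem pvMain (coords : List (Int × Int)) (h : coords ≠ []) :
    generate_orientations coords = generate_orientations_alt coords := by
  have hEnd : (PySem.Set.ofList coords).Nodup := PySem.Set.nodup_ofList coords
  have hEne : PySem.Set.ofList coords ≠ [] := pvOfList_ne_nil coords h
  have hne : ∀ (t : (Int × Int) → (Int × Int)), (PySem.Set.ofList coords).map t ≠ [] :=
    fun t => by simpa using hEne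
  have hnd : ∀ (t : (Int × Int) → (Int × Int)), Function.Injective t →
      ((PySem.Set.ofList coords).map t).Nodup := fun t ht => hEnd.map ht
  have i2 : Function.Injective (fun p : Int × Int => (-p.1, -p.2)) := by
    intro p q hpq; simp only [Prod.mk.injEq] at hpq; exact Prod.ext (by omega) (by omega)
  have i3 : Function.Injective (fun p : Int × Int => (-p.2, p.1)) := by
    intro p q hpq; simp only [Prod.mk.injEq] at hpq; exact Prod.ext (by omega) (by omega)
  have i5 : Function.Injective (fun p : Int × Int => (-p.2, -p.1)) := by
    intro p q hpq; simp only [Prod.mk.injEq] at hpq; exact Prod.ext (by omega) (by omega)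
  have i6 : Function.Injective (fun p : Int × Int => (-p.1, p.2)) := by
    intro p q hpq; simp only [Prod.mk.injEq] at hpq; exact Prod.ext (by omega) (by omega)
  have i7 : Function.Injective (fun p : Int × Int => (p.2, p.1)) := by
    intro p q hpq; simp only [Prod.mk.injEq] at hpq; exact Prod.ext (by omega) (by omega)
  -- A's successive candidates, written through pvNorm
  have e1 : pvRot90 coords =
      pvNorm ((PySem.Set.ofList coords).map (fun p => (p.2, -p.1))) := pvRot90_eq coords h
  have e2 : pvRot90 (pvNorm ((PySem.Set.ofList coords).map (fun p => (p.2, -p.1)))) =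
      pvNorm ((PySem.Set.ofList coords).map (fun p => (-p.1, -p.2))) := by
    rw [pvRot90_norm _ (hne _) (hnd _ pvRotInj), List.map_map]
    apply congrArg
    apply List.map_congr_left
    intro p _
    obtain ⟨a, b⟩ := p
    simp
  have e3 : pvRot90 (pvNorm ((PySem.Set.ofList coords).map (fun p => (-p.1, -p.2)))) =
      pvNorm ((PySem.Set.ofList coords).map (fun p => (-p.2, p.1))) := by
    rw [pvRot90_norm _ (hne _) (hnd _ i2), List.map_map]
    apply congrArg
    apply List.map_congr_left
    intro p _
    obtain ⟨a, b⟩ := p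
    simp
  have e4 : pvFlipH coords =
      pvNorm ((PySem.Set.ofList coords).map (fun p => (p.1, -p.2))) := pvFlipH_eq coords h
  have e5 : pvRot90 (pvNorm ((PySem.Set.ofList coords).map (fun p => (p.1, -p.2)))) =
      pvNorm ((PySem.Set.ofList coords).map (fun p => (-p.2, -p.1))) := by
    rw [pvRot90_norm _ (hne _) (hnd _ pvFlipInj), List.map_map]
    apply congrArg
    apply List.map_congr_left
    intro p _
    obtain ⟨a, b⟩ := p
    simp
  have e6 : pvRot90 (pvNorm ((PySem.Set.ofList coords).map (fun p => (-p.2, -p.1)))) =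
      pvNorm ((PySem.Set.ofList coords).map (fun p => (-p.1, p.2))) := by
    rw [pvRot90_norm _ (hne _) (hnd _ i5), List.map_map]
    apply congrArg
    apply List.map_congr_left
    intro p _
    obtain ⟨a, b⟩ := p
    simp
  have e7 : pvRot90 (pvNorm ((PySem.Set.ofList coords).map (fun p => (-p.1, p.2)))) =
      pvNorm ((PySem.Set.ofList coords).map (fun p => (p.2, p.1))) := by
    rw [pvRot90_norm _ (hne _) (hnd _ i6), List.map_map]
    apply congrArg
    apply List.map_congr_left
    intro p _
    obtain ⟨a, b⟩ := p
    simp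
  -- B's candidates
  have b1 := pvCandB_eq coords _ pvRotInj
  have b2 := pvCandB_eq coords _ i2
  have b3 := pvCandB_eq coords _ i3
  have b4 := pvCandB_eq coords _ pvFlipInj
  have b5 := pvCandB_eq coords _ i5
  have b6 := pvCandB_eq coords _ i6
  have b7 := pvCandB_eq coords _ i7
  -- unfold both programs to an eight-step pvStep chain
  have hA : generate_orientations coords =
      (pvStep (pvStep (pvStep (pvStep (pvStep (pvStep (pvStep (pvStep ([], []) coords)
        (pvRot90 coords)) (pvRot90 (pvRot90 coords))) (pvRot90 (pvRot90 (pvRot90 coords))))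
        (pvFlipH coords)) (pvRot90 (pvFlipH coords))) (pvRot90 (pvRot90 (pvFlipH coords))))
        (pvRot90 (pvRot90 (pvRot90 (pvFlipH coords))))).1 := by
    show ([coords, pvFlipH coords].foldl (fun st base => pvInner 4 st base) ([], [])).1 = _
    simp only [List.foldl_cons, List.foldl_nil, pvInner_four]
  have hB : generate_orientations_alt coords =
      (pvStep (pvStep (pvStep (pvStep (pvStep (pvStep (pvStep (pvStep ([], []) coords)
        (pvCandB coords (fun p => (p.2, -p.1)))) (pvCandB coords (fun p => (-p.1, -p.2))))
        (pvCandB coords (fun p => (-p.2, p.1)))) (pvCandB coords (fun p => (p.1, -p.2))))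
        (pvCandB coords (fun p => (-p.2, -p.1)))) (pvCandB coords (fun p => (-p.1, p.2))))
        (pvCandB coords (fun p => (p.2, p.1)))).1 := by
    simp only [generate_orientations_alt, if_neg h, List.foldl_cons, List.foldl_nil]
    rfl
  rw [hA, hB, e1, e2, e3, e4, e5, e6, e7, b1, b2, b3, b4, b5, b6, b7]

-- ===== VERDICT (by name: the statement is the Claim_ definition above) =====
theorem generate_orientations_spec : Claim_equal_generate_orientations := by
  intro coords _
  unfold Spec_generate_orientations
  by_cases h : coords = []
  · subst h; rfl
  · exact pvMain coords h
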